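-- pv_equiv track=rewrite | github.com/etidal2/rag-gs | rag_gs/stages/s6_rank/run.py | has_two_disjoint_paths
-- ===== SOURCE A (Python) =====
-- from typing import Any, Dict, Iterable, List, Optional, Sequence, Tuple
--
-- def has_two_disjoint_paths(adj: Dict[str, List[str]], start: str, target: str, max_depth: int = 10) -> bool:
--     if start == target:
--         return False
--     paths: List[set] = []
--     stack: List[Tuple[str, List[str]]] = [(start, [start])]
--     while stack and len(paths) < 8:
--         node, path = stack.pop()
--         if len(path) > max_depth:
--             continue
--         for nxt in adj.get(node, []):
--             if nxt in path:
--                 continue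
--             new_path = path + [nxt]
--             if nxt == target:
--                 if len(new_path) >= 3:
--                     internal_nodes = set(new_path[1:-1])
--                     paths.append(internal_nodes)
--             else:
--                 stack.append((nxt, new_path))
--     for i in range(len(paths)):
--         for j in range(i + 1, len(paths)):
--             if paths[i].isdisjoint(paths[j]):
--                 return True
--     return False
-- ===== SOURCE B (Python) =====
-- def has_two_disjoint_paths(adj, start, target, max_depth=10):
--     if start == target:
--         return False
--     paths = []
--
--     def dfs(node, path):
--         if len(paths) >= 8:
--             return
--         if len(path) > max_depth:
--             return
--         kids = []
--         for nxt in adj.get(node, []):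
--             if nxt in path:
--                 continue
--             if nxt == target:
--                 new_path = path + [nxt]
--                 if len(new_path) >= 3:
--                     paths.append(set(new_path[1:-1]))
--             else:
--                 kids.append(nxt)
--         for nxt in reversed(kids):
--             dfs(nxt, path + [nxt])
--
--     dfs(start, [start])
--     for i in range(len(paths)):
--         for j in range(i + 1, len(paths)):
--             if paths[i].isdisjoint(paths[j]):
--                 return True
--     return False
-- ===== Notes on version B (the rewrite author's own statement) =====
-- stated objective: alternative
-- what changed: Replaces the explicit-stack while-loop DFS with a recursive dfs helper that records target hits in forward neighbor order and then recurses into the non-target children in reversed order (matching the stack's LIFO pop sequence), with the 8-path cap checked at call entry.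
import Mathlib
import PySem

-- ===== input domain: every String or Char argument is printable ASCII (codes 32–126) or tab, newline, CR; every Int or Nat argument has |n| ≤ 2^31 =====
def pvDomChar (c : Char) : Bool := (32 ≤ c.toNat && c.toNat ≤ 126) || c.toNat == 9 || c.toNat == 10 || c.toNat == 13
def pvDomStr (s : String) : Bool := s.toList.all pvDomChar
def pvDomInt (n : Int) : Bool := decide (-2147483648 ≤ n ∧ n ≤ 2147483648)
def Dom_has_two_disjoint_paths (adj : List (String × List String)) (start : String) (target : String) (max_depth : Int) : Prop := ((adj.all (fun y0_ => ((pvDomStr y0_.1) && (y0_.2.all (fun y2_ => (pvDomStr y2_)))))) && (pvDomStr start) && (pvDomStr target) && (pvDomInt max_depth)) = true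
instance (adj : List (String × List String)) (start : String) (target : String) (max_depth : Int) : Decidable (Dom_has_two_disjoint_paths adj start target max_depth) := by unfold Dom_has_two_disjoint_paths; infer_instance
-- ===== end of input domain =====

-- B replaces A's explicit-stack DFS by a recursive dfs helper (forward target recording, reversed
-- child recursion, entry-time cap check): an alternative decomposition of the same search, same cost.


-- ===== PORT A =====
-- shared helper: `adj.get(node, [])` (first-match association-list lookup)
def pvAdjGet (adj : List (String × List String)) (node : String) : List String :=
  PySem.Dict.getD (PySem.Dict.mk adj) node []

-- shared helper: the final `for i in range(...): for j in range(i+1, ...):` isdisjoint double loop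
-- (textually identical in both Pythons, hence shared by both ports)
def pvPairsDisjoint (paths : List (PySem.Set String)) : Bool :=
  (PySem.List.pyRange 0 paths.length 1).any fun i =>
    (PySem.List.pyRange (i + 1) paths.length 1).any fun j =>
      PySem.Set.isdisjoint (PySem.List.pyGetD paths i []) (PySem.List.pyGetD paths j [])

-- A's `for nxt in adj.get(node, [])` body: state = (stack, paths)
def pvStepA (target : String) (path : List String)
    (acc : List (String × List String) × List (PySem.Set String)) (nxt : String) :
    List (String × List String) × List (PySem.Set String) :=
  if path.contains nxt then acc
  else
    let new_path := path ++ [nxt]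
    if nxt == target then
      (acc.1, if 3 ≤ new_path.length then
                acc.2 ++ [PySem.Set.ofList (PySem.List.slice new_path (some 1) (some (-1)))]
              else acc.2)
    else ((nxt, new_path) :: acc.1, acc.2)

-- ── termination machinery for the while loop (proof device only; not part of A's algorithm) ──
def pvDeg (adj : List (String × List String)) : Nat :=
  adj.foldr (fun kv m => max kv.2.length m) 0

def pvMdep (maxd : Int) (path : List String) : Nat := (maxd + 1 - path.length).toNat

def pvMu (adj : List (String × List String)) (maxd : Int)
    (stack : List (String × List String)) : Nat :=
  (stack.map (fun e => (pvDeg adj + 1) ^ pvMdep maxd e.2)).sum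

def pvKeep (target : String) (path : List String) (c : String) : Bool :=
  !path.contains c && !(c == target)

def pvTSets (target : String) (path : List String) (children : List String) :
    List (PySem.Set String) :=
  children.filterMap fun c =>
    if (!path.contains c && (c == target) && decide (3 ≤ path.length + 1)) then
      some (PySem.Set.ofList (PySem.List.slice (path ++ [c]) (some 1) (some (-1))))
    else none

theorem pvFoldA_eq (target : String) (path : List String) (children : List String)
    (st0 : List (String × List String)) (ps : List (PySem.Set String)) :
    children.foldl (pvStepA target path) (st0, ps)
      = (((children.filter (pvKeep target path)).map (fun c => (c, path ++ [c]))).reverse ++ st0,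
         ps ++ pvTSets target path children) := by
  induction children generalizing st0 ps with
  | nil => simp [pvTSets]
  | cons c cs ih =>
    by_cases h1 : c ∈ path
    · simp [List.foldl_cons, pvStepA, pvTSets, pvKeep, h1, ih,
        List.filterMap_cons, List.filter_cons]
    · by_cases h2 : c = target
      · subst h2
        by_cases h3 : 2 ≤ path.length <;>
          simp [List.foldl_cons, pvStepA, pvTSets, pvKeep, h1, h3, ih,
            List.filterMap_cons, List.filter_cons, List.append_assoc]
      · simp [List.foldl_cons, pvStepA, pvTSets, pvKeep, h1, h2, ih,
          List.filterMap_cons, List.filter_cons, List.append_assoc]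

theorem pvMdep_append (maxd : Int) (path : List String) (c : String) :
    pvMdep maxd (path ++ [c]) = pvMdep maxd path - 1 := by
  simp only [pvMdep, List.length_append, List.length_cons, List.length_nil]
  omega

theorem pvAdjGet_len_le (adj : List (String × List String)) (node : String) :
    (pvAdjGet adj node).length ≤ pvDeg adj := by
  induction adj with
  | nil => simp [pvAdjGet, PySem.Dict.getD, PySem.Dict.get?, pvDeg]
  | cons kv rest ih =>
    obtain ⟨k, v⟩ := kv
    simp only [pvAdjGet, PySem.Dict.getD] at *
    rw [show (PySem.Dict.mk ((k, v) :: rest)) = { items := (k, v) :: rest } from rfl,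
      PySem.Dict.get?_mk_cons]
    simp only [pvDeg, List.foldr_cons] at *
    by_cases h : k == node
    · simp [h]
    · simp only [h, Bool.false_eq_true, if_false]
      exact le_trans ih (le_max_right _ _)

theorem pvMu_tail_lt (adj : List (String × List String)) (maxd : Int)
    (node : String) (path : List String) (rest : List (String × List String)) :
    pvMu adj maxd rest < pvMu adj maxd ((node, path) :: rest) := by
  have : 0 < (pvDeg adj + 1) ^ pvMdep maxd path := pow_pos (Nat.succ_pos _) _
  simp only [pvMu, List.map_cons, List.sum_cons]
  omega

theorem pvMu_visit_lt (adj : List (String × List String)) (target : String) (maxd : Int)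
    (node : String) (path : List String) (rest : List (String × List String))
    (paths : List (PySem.Set String)) (h : ¬ maxd < (path.length : Int)) :
    pvMu adj maxd ((pvAdjGet adj node).foldl (pvStepA target path) (rest, paths)).1
      < pvMu adj maxd ((node, path) :: rest) := by
  rw [pvFoldA_eq]
  have hm : 1 ≤ pvMdep maxd path := by simp only [pvMdep]; omega
  have hlen : ((pvAdjGet adj node).filter (pvKeep target path)).length ≤ pvDeg adj :=
    le_trans (List.length_filter_le _ _) (pvAdjGet_len_le adj node)
  simp only [pvMu, List.map_append, List.sum_append, List.map_reverse, List.sum_reverse,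
    List.map_map, List.map_cons, List.sum_cons]
  have hconst :
      (((pvAdjGet adj node).filter (pvKeep target path)).map
          ((fun e => (pvDeg adj + 1) ^ pvMdep maxd e.2) ∘ fun c => (c, path ++ [c]))).sum
        = ((pvAdjGet adj node).filter (pvKeep target path)).length
            * (pvDeg adj + 1) ^ (pvMdep maxd path - 1) := by
    have : ((fun e => (pvDeg adj + 1) ^ pvMdep maxd e.2) ∘ fun c : String => (c, path ++ [c]))
        = fun _ => (pvDeg adj + 1) ^ (pvMdep maxd path - 1) := by
      funext c; simp [Function.comp, pvMdep_append]
    rw [this, List.map_const', List.sum_replicate, smul_eq_mul]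
  rw [hconst]
  have hpow : ((pvAdjGet adj node).filter (pvKeep target path)).length
      * (pvDeg adj + 1) ^ (pvMdep maxd path - 1)
      < (pvDeg adj + 1) ^ pvMdep maxd path := by
    have h1 : (pvDeg adj + 1) ^ pvMdep maxd path
        = (pvDeg adj + 1) ^ (pvMdep maxd path - 1) * (pvDeg adj + 1) := by
      rw [← pow_succ]; congr 1; omega
    have h2 : 0 < (pvDeg adj + 1) ^ (pvMdep maxd path - 1) :=
      pow_pos (Nat.succ_pos _) _
    calc ((pvAdjGet adj node).filter (pvKeep target path)).length
          * (pvDeg adj + 1) ^ (pvMdep maxd path - 1)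
        ≤ pvDeg adj * (pvDeg adj + 1) ^ (pvMdep maxd path - 1) :=
          Nat.mul_le_mul_right _ hlen
      _ < (pvDeg adj + 1) * (pvDeg adj + 1) ^ (pvMdep maxd path - 1) :=
          (Nat.mul_lt_mul_right h2).mpr (Nat.lt_succ_self _)
      _ = (pvDeg adj + 1) ^ pvMdep maxd path := by rw [h1]; ring
  omega

-- the `while stack and len(paths) < 8:` loop of A
def pvLoopA (adj : List (String × List String)) (target : String) (maxd : Int) :
    List (String × List String) → List (PySem.Set String) → List (PySem.Set String)
  | [], paths => paths
  | (node, path) :: rest, paths =>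
    if 8 ≤ paths.length then paths
    else if h : maxd < (path.length : Int) then
      pvLoopA adj target maxd rest paths
    else
      let r := (pvAdjGet adj node).foldl (pvStepA target path) (rest, paths)
      pvLoopA adj target maxd r.1 r.2
termination_by stack => pvMu adj maxd stack
decreasing_by
  · exact pvMu_tail_lt adj maxd node path rest
  · exact pvMu_visit_lt adj target maxd node path rest paths h

def has_two_disjoint_paths (adj : List (String × List String)) (start : String) (target : String) (max_depth : Int) : Bool :=
  if start == target then false
  else pvPairsDisjoint (pvLoopA adj target max_depth [(start, [start])] [])

-- ===== PORT B =====
-- B's neighbor loop body: state = (paths, kids)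
def pvStepB (target : String) (path : List String)
    (acc : List (PySem.Set String) × List String) (nxt : String) :
    List (PySem.Set String) × List String :=
  if path.contains nxt then acc
  else if nxt == target then
    let new_path := path ++ [nxt]
    (if 3 ≤ new_path.length then
       acc.1 ++ [PySem.Set.ofList (PySem.List.slice new_path (some 1) (some (-1)))]
     else acc.1, acc.2)
  else (acc.1, acc.2 ++ [nxt])

-- B's recursive dfs; the Nat fuel only makes the recursion structural (depth is in any case
-- bounded by the `len(path) > max_depth` check, which the initial fuel max_depth.toNat covers)
def pvDfsB (adj : List (String × List String)) (target : String) (maxd : Int) :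
    Nat → String → List String → List (PySem.Set String) → List (PySem.Set String)
  | 0, _, _, paths => paths
  | Nat.succ f, node, path, paths =>
    if 8 ≤ paths.length then paths
    else if maxd < (path.length : Int) then paths
    else
      let r := (pvAdjGet adj node).foldl (pvStepB target path) (paths, [])
      r.2.reverse.foldl (fun acc c => pvDfsB adj target maxd f c (path ++ [c]) acc) r.1

def has_two_disjoint_paths_alt (adj : List (String × List String)) (start : String) (target : String) (max_depth : Int) : Bool :=
  if start == target then false
  else pvPairsDisjoint (pvDfsB adj target max_depth max_depth.toNat start [start] [])

-- ===== PRECONDITION & SPEC =====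
def Spec_has_two_disjoint_paths (adj : List (String × List String)) (start : String) (target : String) (max_depth : Int) (out : Bool) : Prop := out = has_two_disjoint_paths_alt adj start target max_depth
instance (adj : List (String × List String)) (start : String) (target : String) (max_depth : Int) (out : Bool) : Decidable (Spec_has_two_disjoint_paths adj start target max_depth out) := by unfold Spec_has_two_disjoint_paths; infer_instance

-- ===== CLAIM (what is proved, stated in full; the proofs are below) =====
def Claim_equal_has_two_disjoint_paths : Prop := ∀ (adj : List (String × List String)) (start : String) (target : String) (max_depth : Int), Dom_has_two_disjoint_paths adj start target max_depth → Spec_has_two_disjoint_paths adj start target max_depth (has_two_disjoint_paths adj start target max_depth)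

-- ===== LEMMAS AND PROOFS =====

theorem pvFoldB_eq (target : String) (path : List String) (children : List String)
    (ps : List (PySem.Set String)) (ks0 : List String) :
    children.foldl (pvStepB target path) (ps, ks0)
      = (ps ++ pvTSets target path children, ks0 ++ children.filter (pvKeep target path)) := by
  induction children generalizing ps ks0 with
  | nil => simp [pvTSets]
  | cons c cs ih =>
    by_cases h1 : c ∈ path
    · simp [List.foldl_cons, pvStepB, pvTSets, pvKeep, h1, ih,
        List.filterMap_cons, List.filter_cons]
    · by_cases h2 : c = target
      · subst h2
        by_cases h3 : 2 ≤ path.length <;>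
          simp [List.foldl_cons, pvStepB, pvTSets, pvKeep, h1, h3, ih,
            List.filterMap_cons, List.filter_cons, List.append_assoc]
      · simp [List.foldl_cons, pvStepB, pvTSets, pvKeep, h1, h2, ih,
          List.filterMap_cons, List.filter_cons, List.append_assoc]

theorem pvDfsB_cap (adj : List (String × List String)) (target : String) (maxd : Int)
    (f : Nat) (node : String) (path : List String) (paths : List (PySem.Set String))
    (h : 8 ≤ paths.length) : pvDfsB adj target maxd f node path paths = paths := by
  cases f <;> simp [pvDfsB, h]

def pvDfsMany (adj : List (String × List String)) (target : String) (maxd : Int)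
    (stack : List (String × List String)) (paths : List (PySem.Set String)) :
    List (PySem.Set String) :=
  stack.foldl (fun acc e => pvDfsB adj target maxd (pvMdep maxd e.2) e.1 e.2 acc) paths

theorem pvDfsMany_cap (adj : List (String × List String)) (target : String) (maxd : Int)
    (stack : List (String × List String)) (paths : List (PySem.Set String))
    (h : 8 ≤ paths.length) : pvDfsMany adj target maxd stack paths = paths := by
  induction stack with
  | nil => rfl
  | cons e rest ih => simp [pvDfsMany, pvDfsB_cap _ _ _ _ _ _ _ h] at *; exact ih

theorem pvLoop_eq_many (adj : List (String × List String)) (target : String) (maxd : Int) :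
    ∀ (N : Nat) (stack : List (String × List String)) (paths : List (PySem.Set String)),
      pvMu adj maxd stack ≤ N →
      pvLoopA adj target maxd stack paths = pvDfsMany adj target maxd stack paths := by
  intro N
  induction N with
  | zero =>
    intro stack paths hmu
    cases stack with
    | nil => simp [pvLoopA, pvDfsMany]
    | cons e rest =>
      exfalso
      have hpos : 0 < (pvDeg adj + 1) ^ pvMdep maxd e.2 := pow_pos (Nat.succ_pos _) _
      simp only [pvMu, List.map_cons, List.sum_cons] at hmu
      omega
  | succ N ih =>
    intro stack paths hmu
    cases stack with
    | nil => simp [pvLoopA, pvDfsMany]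
    | cons e rest =>
      obtain ⟨node, path⟩ := e
      rw [pvLoopA.eq_2]
      by_cases h8 : 8 ≤ paths.length
      · rw [if_pos h8]
        simp only [pvDfsMany, List.foldl_cons]
        rw [pvDfsB_cap _ _ _ _ _ _ _ h8]
        exact (pvDfsMany_cap adj target maxd rest paths h8).symm
      · rw [if_neg h8]
        by_cases hd : maxd < (path.length : Int)
        · rw [dif_pos hd]
          have hrest : pvMu adj maxd rest ≤ N := by
            have := pvMu_tail_lt adj maxd node path rest; omega
          rw [ih rest paths hrest]
          have h0 : pvMdep maxd path = 0 := by simp only [pvMdep]; omega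
          simp only [pvDfsMany, List.foldl_cons, h0, pvDfsB]
        · rw [dif_neg hd]
          have hm1 : 1 ≤ pvMdep maxd path := by simp only [pvMdep]; omega
          obtain ⟨f, hf⟩ : ∃ f, pvMdep maxd path = f + 1 := ⟨pvMdep maxd path - 1, by omega⟩
          have hmu' : pvMu adj maxd
              ((pvAdjGet adj node).foldl (pvStepA target path) (rest, paths)).1 ≤ N := by
            have := pvMu_visit_lt adj target maxd node path rest paths hd
            omega
          rw [ih _ _ hmu', pvFoldA_eq]
          simp only [pvDfsMany, List.foldl_cons, List.foldl_append]
          congr 1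
          rw [hf]
          simp only [pvDfsB, if_neg h8, if_neg hd, pvFoldB_eq, List.nil_append]
          rw [← List.map_reverse, List.foldl_map]
          simp only [pvMdep_append, hf, Nat.add_sub_cancel]

-- ===== VERDICT (by name: the statement is the Claim_ definition above) =====
theorem has_two_disjoint_paths_spec : Claim_equal_has_two_disjoint_paths := by
  intro adj start target max_depth _
  unfold Spec_has_two_disjoint_paths has_two_disjoint_paths has_two_disjoint_paths_alt
  by_cases hs : start == target
  · simp [hs]
  · simp only [hs, if_false, Bool.false_eq_true]
    congr 1
    rw [pvLoop_eq_many adj target max_depth (pvMu adj max_depth [(start, [start])])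
        [(start, [start])] [] le_rfl]
    simp only [pvDfsMany, List.foldl_cons, List.foldl_nil]
    congr 1
    simp [pvMdep]
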